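-- pv_equiv track=rewrite | github.com/Project-UniCloud/uc-adapter-aws | cost_monitoring/limit_manager.py | _aws_service_to_short
-- ===== SOURCE A (Python) =====
-- def _aws_service_to_short(name: str) -> str:
--     n = (name or '').lower()
--     # Explicit mappings by common substrings
--     if 'ec2' in n or 'elastic compute cloud' in n:
--         return 'ec2'
--     if 'simple storage service' in n or n == 'amazon s3' or ' s3' in n:
--         return 's3'
--     if 'elastic block store' in n or 'ebs' in n:
--         return 'ebs'
--     if 'relational database service' in n or ' rds' in n:
--         return 'rds'
--     if 'cloudwatch' in n:
--         return 'cloudwatch'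
--     if 'lambda' in n:
--         return 'lambda'
--     if 'elastic container registry' in n or ' ecr' in n:
--         return 'ecr'
--     if 'elastic kubernetes service' in n or ' eks' in n:
--         return 'eks'
--     if 'virtual private cloud' in n or ' vpc' in n:
--         return 'vpc'
--     if 'systems manager' in n or ' ssm' in n:
--         return 'ssm'
--     if 'key management service' in n or ' kms' in n:
--         return 'kms'
--     if 'dynamodb' in n:
--         return 'dynamodb'
--     if 'simple queue service' in n or ' sqs' in n:
--         return 'sqs'
--     if 'simple notification service' in n or ' sns' in n:
--         return 'sns'
--     if 'cloudtrail' in n: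
--         return 'cloudtrail'
--     # Fallback: take last word/acronym
--     for token in ['aurora', 'redshift', 'athena', 'glue', 'emr', 'opensearch', 'kinesis']:
--         if token in n:
--             return token
--     # generic fallback: normalized first acronym-like
--     return n.split(' - ')[0].split()[-1].replace('amazon', '').strip() or 'other'
-- ===== SOURCE B (Python) =====
-- # Position-scan re-implementation: instead of testing each pattern with the substring
-- # operator in an if-chain, scan the text once position by position and keep the
-- # best (lowest-index) pattern that starts anywhere; the generic fallback is verbatim A's.
-- # The exact 'amazon s3' test of the original is dropped: 'amazon s3' contains ' s3'
-- # anyway, so it is redundant.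
-- _PATTERNS = [
--     ('ec2', 'ec2'), ('ec2', 'elastic compute cloud'),
--     ('s3', 'simple storage service'), ('s3', ' s3'),
--     ('ebs', 'elastic block store'), ('ebs', 'ebs'),
--     ('rds', 'relational database service'), ('rds', ' rds'),
--     ('cloudwatch', 'cloudwatch'),
--     ('lambda', 'lambda'),
--     ('ecr', 'elastic container registry'), ('ecr', ' ecr'),
--     ('eks', 'elastic kubernetes service'), ('eks', ' eks'),
--     ('vpc', 'virtual private cloud'), ('vpc', ' vpc'),
--     ('ssm', 'systems manager'), ('ssm', ' ssm'),
--     ('kms', 'key management service'), ('kms', ' kms'),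
--     ('dynamodb', 'dynamodb'),
--     ('sqs', 'simple queue service'), ('sqs', ' sqs'),
--     ('sns', 'simple notification service'), ('sns', ' sns'),
--     ('cloudtrail', 'cloudtrail'),
--     ('aurora', 'aurora'), ('redshift', 'redshift'), ('athena', 'athena'),
--     ('glue', 'glue'), ('emr', 'emr'), ('opensearch', 'opensearch'),
--     ('kinesis', 'kinesis'),
-- ]
--
--
-- def _aws_service_to_short(name: str) -> str:
--     n = (name or '').lower()
--     best = len(_PATTERNS)  # sentinel: nothing matched yet
--     for i in range(len(n)):
--         for k in range(best):
--             if n.startswith(_PATTERNS[k][1], i):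
--                 best = k
--                 break
--     if best < len(_PATTERNS):
--         return _PATTERNS[best][0]
--     # generic fallback: normalized first acronym-like
--     return n.split(' - ')[0].split()[-1].replace('amazon', '').strip() or 'other'
-- ===== Notes on version B (the rewrite author's own statement) =====
-- stated objective: alternative
-- what changed: Instead of an if-chain of substring tests, B scans the lowered text once position by position, checking at each position which pattern from a flat priority list starts there and keeping the best (lowest-priority-index) match; the redundant exact 'amazon s3' test is dropped (that string contains ' s3'), and the generic fallback expression is kept verbatim.
-- outside the precondition, e.g. on _aws_service_to_short(''): A raises IndexError, B raises IndexError; on _aws_service_to_short(' - '): A raises IndexError, B raises IndexError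
import Mathlib
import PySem

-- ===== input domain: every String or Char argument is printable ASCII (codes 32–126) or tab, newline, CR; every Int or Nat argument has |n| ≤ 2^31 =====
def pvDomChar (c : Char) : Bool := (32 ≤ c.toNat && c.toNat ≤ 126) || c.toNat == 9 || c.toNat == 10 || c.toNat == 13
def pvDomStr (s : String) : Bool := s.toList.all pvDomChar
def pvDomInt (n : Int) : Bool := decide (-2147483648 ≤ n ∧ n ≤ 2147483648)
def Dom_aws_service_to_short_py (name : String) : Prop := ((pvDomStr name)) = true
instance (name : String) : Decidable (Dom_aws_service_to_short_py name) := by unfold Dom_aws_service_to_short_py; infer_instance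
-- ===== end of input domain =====

-- B replaces A's if-chain of substring tests by a single position scan of the text that keeps
-- the best-priority pattern starting anywhere (objective: alternative); values agree wherever A returns.

-- ===== PORT A =====
-- generic fallback of A: n.split(' - ')[0].split()[-1].replace('amazon','').strip() or 'other'
-- (the pyGet? none case is Python's IndexError, excluded by Pre_); Source B's fallback is the
-- verbatim same expression, so both ports share this helper
def pvFallbackA (n : String) : String :=
  match PySem.List.pyGet? (PySem.Str.split₀ (((PySem.Str.split? n " - ").getD []).headD "")) (-1) with
  | none => ""
  | some w =>
    let r := PySem.Str.strip (PySem.Str.replace w "amazon" "")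
    if r == "" then "other" else r

-- the body of A after 'n = (name or '').lower()': the if-chain and token loop
def pvChainA (n : String) : String :=
  if PySem.Str.isIn "ec2" n || PySem.Str.isIn "elastic compute cloud" n then "ec2"
  else if PySem.Str.isIn "simple storage service" n || (n == "amazon s3" || PySem.Str.isIn " s3" n) then "s3"
  else if PySem.Str.isIn "elastic block store" n || PySem.Str.isIn "ebs" n then "ebs"
  else if PySem.Str.isIn "relational database service" n || PySem.Str.isIn " rds" n then "rds"
  else if PySem.Str.isIn "cloudwatch" n then "cloudwatch"
  else if PySem.Str.isIn "lambda" n then "lambda"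
  else if PySem.Str.isIn "elastic container registry" n || PySem.Str.isIn " ecr" n then "ecr"
  else if PySem.Str.isIn "elastic kubernetes service" n || PySem.Str.isIn " eks" n then "eks"
  else if PySem.Str.isIn "virtual private cloud" n || PySem.Str.isIn " vpc" n then "vpc"
  else if PySem.Str.isIn "systems manager" n || PySem.Str.isIn " ssm" n then "ssm"
  else if PySem.Str.isIn "key management service" n || PySem.Str.isIn " kms" n then "kms"
  else if PySem.Str.isIn "dynamodb" n then "dynamodb"
  else if PySem.Str.isIn "simple queue service" n || PySem.Str.isIn " sqs" n then "sqs"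
  else if PySem.Str.isIn "simple notification service" n || PySem.Str.isIn " sns" n then "sns"
  else if PySem.Str.isIn "cloudtrail" n then "cloudtrail"
  -- for token in [...]: if token in n: return token
  else if PySem.Str.isIn "aurora" n then "aurora"
  else if PySem.Str.isIn "redshift" n then "redshift"
  else if PySem.Str.isIn "athena" n then "athena"
  else if PySem.Str.isIn "glue" n then "glue"
  else if PySem.Str.isIn "emr" n then "emr"
  else if PySem.Str.isIn "opensearch" n then "opensearch"
  else if PySem.Str.isIn "kinesis" n then "kinesis"
  else pvFallbackA n

def aws_service_to_short_py (name : String) : String :=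
  pvChainA (PySem.Str.lower (if name == "" then "" else name))

-- ===== PORT B =====
-- Source B's _PATTERNS: flat (code, pattern) list in priority order
def pvPats : List (String × String) :=
  [ ("ec2", "ec2"), ("ec2", "elastic compute cloud"),
    ("s3", "simple storage service"), ("s3", " s3"),
    ("ebs", "elastic block store"), ("ebs", "ebs"),
    ("rds", "relational database service"), ("rds", " rds"),
    ("cloudwatch", "cloudwatch"),
    ("lambda", "lambda"),
    ("ecr", "elastic container registry"), ("ecr", " ecr"),
    ("eks", "elastic kubernetes service"), ("eks", " eks"),
    ("vpc", "virtual private cloud"), ("vpc", " vpc"),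
    ("ssm", "systems manager"), ("ssm", " ssm"),
    ("kms", "key management service"), ("kms", " kms"),
    ("dynamodb", "dynamodb"),
    ("sqs", "simple queue service"), ("sqs", " sqs"),
    ("sns", "simple notification service"), ("sns", " sns"),
    ("cloudtrail", "cloudtrail"),
    ("aurora", "aurora"), ("redshift", "redshift"), ("athena", "athena"),
    ("glue", "glue"), ("emr", "emr"), ("opensearch", "opensearch"),
    ("kinesis", "kinesis") ]

-- inner loop 'for k in range(best): if n.startswith(_PATTERNS[k][1], i): best = k; break'
-- (n.startswith(p, i) with 0 ≤ i ≤ len(n) is exactly: p is a prefix of n[i:], i.e. of nl.drop i)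
def pvInner (nl : List Char) (i : Nat) (k best : Nat) : Nat :=
  if _h : k < best then
    if PySem.Chars.startswith (nl.drop i) ((pvPats.getD k ("", "")).2.toList) then k
    else pvInner nl i (k + 1) best
  else best
termination_by best - k

-- outer loop 'for i in range(len(n))' over the positions of n, threading best
def pvOuter (nl : List Char) : Nat :=
  (List.range nl.length).foldl (fun best i => pvInner nl i 0 best) pvPats.length

def aws_service_to_short_py_alt (name : String) : String :=
  let n := PySem.Str.lower (if name == "" then "" else name)
  let best := pvOuter n.toList
  if best < pvPats.length then (pvPats.getD best ("", "")).1
  else pvFallbackA n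

-- ===== PRECONDITION & SPEC =====
-- Pre_ excludes exactly the inputs where A raises IndexError: no listed pattern matches and the
-- part of name.lower() before the first ' - ' has no non-whitespace character (so [-1] hits an empty list).
def Pre_aws_service_to_short_py (name : String) : Prop :=
  (["ec2", "elastic compute cloud", "simple storage service", " s3", "elastic block store", "ebs",
    "relational database service", " rds", "cloudwatch", "lambda", "elastic container registry",
    " ecr", "elastic kubernetes service", " eks", "virtual private cloud", " vpc", "systems manager",
    " ssm", "key management service", " kms", "dynamodb", "simple queue service", " sqs",
    "simple notification service", " sns", "cloudtrail", "aurora", "redshift", "athena", "glue",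
    "emr", "opensearch", "kinesis"].any
      (fun s => PySem.Str.isIn s (PySem.Str.lower name)) = true)
  ∨ PySem.Str.lower name = "amazon s3"
  ∨ PySem.Str.split₀ (((PySem.Str.split? (PySem.Str.lower name) " - ").getD []).headD "") ≠ []
instance (name : String) : Decidable (Pre_aws_service_to_short_py name) := by unfold Pre_aws_service_to_short_py; infer_instance
def pvWitness_aws_service_to_short_py : String := "Amazon EC2"

def Spec_aws_service_to_short_py (name : String) (out : String) : Prop := out = aws_service_to_short_py_alt name
instance (name : String) (out : String) : Decidable (Spec_aws_service_to_short_py name out) := by unfold Spec_aws_service_to_short_py; infer_instance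

-- ===== CLAIM (what is proved, stated in full; the proofs are below) =====
def Claim_equal_aws_service_to_short_py : Prop := ∀ (name : String), Dom_aws_service_to_short_py name → Pre_aws_service_to_short_py name → Spec_aws_service_to_short_py name (aws_service_to_short_py name)

-- ===== LEMMAS AND PROOFS =====

-- reference first-match loop over the flat pattern list, used only in the proofs
def pvRef (n : String) : List (String × String) → String
  | [] => pvFallbackA n
  | p :: rest => if PySem.Str.isIn p.2 n then p.1 else pvRef n rest

theorem pvOrSplit (a b : Bool) (v x : String) :
    (if a || b then v else x) = (if a then v else if b then v else x) := by
  cases a <;> cases b <;> rfl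

-- A's chain equals the reference first-match loop over pvPats; the exact test
-- n == "amazon s3" is subsumed by the ' s3' substring test
set_option maxHeartbeats 1600000 in
theorem pvChain_eq_ref (n : String) : pvChainA n = pvRef n pvPats := by
  by_cases h : n = "amazon s3"
  · subst h; decide
  · have hbeq : (n == "amazon s3") = false := by simp [h]
    unfold pvChainA
    simp only [pvRef, pvPats, pvOrSplit, hbeq, Bool.false_eq_true, if_false]

-- every pattern in pvPats is nonempty
theorem pvPats_nonempty : ∀ k, k < pvPats.length → ((pvPats.getD k ("", "")).2.toList ≠ []) := by
  decide

-- a nonempty pattern occurs as a substring iff it starts at some position < length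
theorem pvMatched_iff (n p : List Char) (hp : p ≠ []) :
    (∃ i, i < n.length ∧ PySem.Chars.startswith (n.drop i) p = true) ↔
      PySem.Chars.isIn p n = true := by
  constructor
  · rintro ⟨i, _, hi⟩
    rw [← PySem.Chars.exists_prefix_drop_iff_isIn]
    exact ⟨i, (PySem.Chars.startswith_iff _ _).mp hi⟩
  · intro h
    obtain ⟨j, hj⟩ := (PySem.Chars.exists_prefix_drop_iff_isIn p n).mpr h
    refine ⟨j, ?_, (PySem.Chars.startswith_iff _ _).mpr hj⟩
    by_contra hlen
    rw [not_lt] at hlen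
    rw [List.drop_eq_nil_of_le hlen] at hj
    exact hp (List.prefix_nil.mp hj)

-- specification of the inner loop: first k in [k₀, best) whose pattern starts at i, else best
theorem pvInner_spec (nl : List Char) (i : Nat) :
    ∀ k best, pvInner nl i k best ≤ best ∧
      (∀ j, k ≤ j → j < pvInner nl i k best →
        PySem.Chars.startswith (nl.drop i) ((pvPats.getD j ("", "")).2.toList) = false) ∧
      (pvInner nl i k best < best →
        PySem.Chars.startswith (nl.drop i)
          ((pvPats.getD (pvInner nl i k best) ("", "")).2.toList) = true) := by
  intro k best
  induction' hfuel : best - k with m ih generalizing k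
  · rw [pvInner]
    have hk : ¬ k < best := by omega
    rw [dif_neg hk]
    exact ⟨le_refl _, fun j h1 h2 => by omega, fun h => absurd h (lt_irrefl _)⟩
  · rw [pvInner]
    by_cases hk : k < best
    · rw [dif_pos hk]
      by_cases hsw : PySem.Chars.startswith (nl.drop i) ((pvPats.getD k ("", "")).2.toList) = true
      · rw [if_pos hsw]
        exact ⟨le_of_lt hk, fun j h1 h2 => by omega, fun _ => hsw⟩
      · rw [if_neg hsw]
        have hsw' : PySem.Chars.startswith (nl.drop i) ((pvPats.getD k ("", "")).2.toList) = false := by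
          simpa using hsw
        obtain ⟨h1, h2, h3⟩ := ih (k + 1) (by omega)
        refine ⟨h1, fun j hj1 hj2 => ?_, h3⟩
        rcases Nat.eq_or_lt_of_le hj1 with h | h
        · exact h ▸ hsw'
        · exact h2 j h hj2
    · omega

-- specification of the outer fold: the result is min(best, least globally matching index)
theorem pvFold_spec (nl : List Char) (is : List Nat) :
    ∀ best, (is.foldl (fun b i => pvInner nl i 0 b) best) ≤ best ∧
      (∀ k, k < is.foldl (fun b i => pvInner nl i 0 b) best → ∀ i ∈ is,
        PySem.Chars.startswith (nl.drop i) ((pvPats.getD k ("", "")).2.toList) = false) ∧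
      (is.foldl (fun b i => pvInner nl i 0 b) best < best → ∃ i ∈ is,
        PySem.Chars.startswith (nl.drop i)
          ((pvPats.getD (is.foldl (fun b i => pvInner nl i 0 b) best) ("", "")).2.toList) = true) := by
  induction is with
  | nil =>
    intro best
    exact ⟨le_refl _, by simp, by simp⟩
  | cons i rest ih =>
    intro best
    simp only [List.foldl_cons]
    obtain ⟨ha, hb, hc⟩ := ih (pvInner nl i 0 best)
    obtain ⟨ia, ib, ic⟩ := pvInner_spec nl i 0 best
    refine ⟨le_trans ha ia, ?_, ?_⟩
    · intro k hk i' hi'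
      rcases List.mem_cons.mp hi' with h | h
      · subst h; exact ib k (Nat.zero_le _) (lt_of_lt_of_le hk ha)
      · exact hb k hk i' h
    · intro hlt
      by_cases h : rest.foldl (fun b i => pvInner nl i 0 b) (pvInner nl i 0 best) < pvInner nl i 0 best
      · obtain ⟨i', hi', hsw⟩ := hc h
        exact ⟨i', List.mem_cons_of_mem _ hi', hsw⟩
      · have heq : rest.foldl (fun b i => pvInner nl i 0 b) (pvInner nl i 0 best) = pvInner nl i 0 best := by
          omega
        rw [heq]
        exact ⟨i, List.mem_cons_self, ic (by omega)⟩

-- generic: an index with the two first-match facts reproduces the first-match loop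
theorem pvRef_of_firstIdx (n : String) (ps : List (String × String)) (F : Nat)
    (hle : F ≤ ps.length)
    (hlow : ∀ k, k < F → PySem.Str.isIn (ps.getD k ("", "")).2 n = false)
    (hhit : F < ps.length → PySem.Str.isIn (ps.getD F ("", "")).2 n = true) :
    (if F < ps.length then (ps.getD F ("", "")).1 else pvFallbackA n) = pvRef n ps := by
  induction ps generalizing F with
  | nil =>
    have hF : F = 0 := by simpa using hle
    subst hF; simp [pvRef]
  | cons p rest ih =>
    by_cases hF : F = 0
    · subst hF
      have hp : PySem.Str.isIn p.2 n = true := by simpa using hhit (Nat.succ_pos _)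
      have hp' : PySem.Chars.isIn p.2.toList n.toList = true := by simpa using hp
      simp only [pvRef]
      simp [hp']
    · obtain ⟨F', rfl⟩ : ∃ F', F = F' + 1 := ⟨F - 1, by omega⟩
      have h0 : PySem.Str.isIn p.2 n = false := by simpa using hlow 0 (Nat.succ_pos _)
      simp only [pvRef]
      have hstep : (if PySem.Str.isIn p.2 n = true then p.1 else pvRef n rest) = pvRef n rest :=
        if_neg (by simp [show PySem.Chars.isIn p.2.toList n.toList = false by simpa using h0])
      rw [hstep]
      have hrec := ih F' (by simpa using hle)
        (fun k hk => by simpa using hlow (k + 1) (by omega))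
        (fun h => by simpa using hhit (by simpa using Nat.succ_lt_succ h))
      rw [← hrec]
      simp

-- B's scan result, converted through pvMatched_iff, yields exactly the reference loop
theorem pvAlt_eq_ref (n : String) :
    (if pvOuter n.toList < pvPats.length then (pvPats.getD (pvOuter n.toList) ("", "")).1
     else pvFallbackA n) = pvRef n pvPats := by
  unfold pvOuter
  obtain ⟨ha, hb, hc⟩ := pvFold_spec n.toList (List.range n.toList.length) pvPats.length
  apply pvRef_of_firstIdx n pvPats _ ha
  · intro k hk
    have hne := pvPats_nonempty k (by omega)
    have hfalse : ¬ PySem.Chars.isIn ((pvPats.getD k ("", "")).2.toList) n.toList = true := by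
      rw [← pvMatched_iff _ _ hne]
      rintro ⟨i, hi, hsw⟩
      have := hb k hk i (List.mem_range.mpr hi)
      rw [this] at hsw
      exact Bool.false_ne_true hsw
    simpa using hfalse
  · intro hlt
    obtain ⟨i, hi, hsw⟩ := hc hlt
    have := (pvMatched_iff n.toList _ (pvPats_nonempty _ hlt)).mp ⟨i, List.mem_range.mp hi, hsw⟩
    simpa using this

-- ===== VERDICT (by name: the statement is the Claim_ definition above) =====
theorem aws_service_to_short_py_spec : Claim_equal_aws_service_to_short_py := by
  intro name _ _
  unfold Spec_aws_service_to_short_py aws_service_to_short_py aws_service_to_short_py_alt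
  simp only [pvChain_eq_ref, ← pvAlt_eq_ref]
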